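-- pv_equiv track=rewrite | github.com/MrDangwal/sales-data-AI-agent | src/crew_pipeline.py | _suggest_next_question
-- ===== SOURCE A (Python) =====
-- def _suggest_next_question(question: str) -> str:
--     q = question.lower()
--     if any(k in q for k in ["trend", "month", "date"]):
--         return "Would you like the same trend segmented by top categories?"
--     if "state" in q or "city" in q:
--         return "Do you want a month-wise trend for these top geographies?"
--     if "category" in q:
--         return "Should I add cancellation rate and volume beside the category metric?"
--     if "expense" in q:
--         return "Do you want a cumulative cashflow trend with running balance?"
--     if "mrp" in q or "tp" in q or "price" in q:
--         return "Should I calculate spread percent and outlier products for this pricing view?"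
--     return "Do you want this analysis compared against another relevant dataset?"
-- ===== SOURCE B (Python) =====
-- # Exhaustive keyword scoring: every keyword carries the priority of its rule group;
-- # collect the priorities of ALL keywords present and take the minimum (argmin),
-- # instead of an ordered short-circuit if/return chain. No early exit; rule order is
-- # encoded arithmetically, not by control flow.
--
-- PRIORITY = {
--     "trend": 0, "month": 0, "date": 0,
--     "state": 1, "city": 1,
--     "category": 2,
--     "expense": 3,
--     "mrp": 4, "tp": 4, "price": 4,
-- }
--
-- RESPONSES = [
--     "Would you like the same trend segmented by top categories?",
--     "Do you want a month-wise trend for these top geographies?",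
--     "Should I add cancellation rate and volume beside the category metric?",
--     "Do you want a cumulative cashflow trend with running balance?",
--     "Should I calculate spread percent and outlier products for this pricing view?",
--     "Do you want this analysis compared against another relevant dataset?",
-- ]
--
--
-- def _suggest_next_question(question: str) -> str:
--     q = question.lower()
--     best = min((p for kw, p in PRIORITY.items() if kw in q), default=len(RESPONSES) - 1)
--     return RESPONSES[best]
-- ===== Notes on version B (the rewrite author's own statement) =====
-- stated objective: alternative
-- what changed: Replaces the ordered short-circuit if/return chain by exhaustive scoring: every keyword is tagged with its rule-group priority, all present keywords are scored, and the answer is indexed by the minimum priority (min with a default), so rule order is arithmetic, not control flow.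
import Mathlib
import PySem

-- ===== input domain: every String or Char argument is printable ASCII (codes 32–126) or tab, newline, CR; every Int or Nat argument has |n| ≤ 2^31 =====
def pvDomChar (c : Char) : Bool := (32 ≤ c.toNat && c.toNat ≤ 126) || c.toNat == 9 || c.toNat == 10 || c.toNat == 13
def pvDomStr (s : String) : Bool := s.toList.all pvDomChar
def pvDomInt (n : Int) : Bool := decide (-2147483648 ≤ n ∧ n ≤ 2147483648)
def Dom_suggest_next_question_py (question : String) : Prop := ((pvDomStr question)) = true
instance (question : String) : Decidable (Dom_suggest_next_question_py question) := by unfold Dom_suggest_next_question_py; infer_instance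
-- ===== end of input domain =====

-- B replaces A's ordered if/return chain by exhaustive keyword scoring: every keyword carries its
-- rule-group priority, every present keyword is scored, and the answer is indexed by the minimum
-- priority (alternative decomposition; same cost).

-- ===== PORT A =====
def suggest_next_question_py (question : String) : String :=
  let q := PySem.Str.lower question
  if ["trend", "month", "date"].any (fun k => PySem.Str.isIn k q) then
    "Would you like the same trend segmented by top categories?"
  else if PySem.Str.isIn "state" q || PySem.Str.isIn "city" q then
    "Do you want a month-wise trend for these top geographies?"
  else if PySem.Str.isIn "category" q then
    "Should I add cancellation rate and volume beside the category metric?"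
  else if PySem.Str.isIn "expense" q then
    "Do you want a cumulative cashflow trend with running balance?"
  else if PySem.Str.isIn "mrp" q || PySem.Str.isIn "tp" q || PySem.Str.isIn "price" q then
    "Should I calculate spread percent and outlier products for this pricing view?"
  else
    "Do you want this analysis compared against another relevant dataset?"

-- ===== PORT B =====
-- PRIORITY dict as an insertion-ordered association list
def pvPriority : List (String × Nat) :=
  [("trend", 0), ("month", 0), ("date", 0),
   ("state", 1), ("city", 1),
   ("category", 2),
   ("expense", 3),
   ("mrp", 4), ("tp", 4), ("price", 4)]

def pvResponses : List String :=
  [ "Would you like the same trend segmented by top categories?",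
    "Do you want a month-wise trend for these top geographies?",
    "Should I add cancellation rate and volume beside the category metric?",
    "Do you want a cumulative cashflow trend with running balance?",
    "Should I calculate spread percent and outlier products for this pricing view?",
    "Do you want this analysis compared against another relevant dataset?" ]

-- min((p for kw, p in PRIORITY.items() if kw in q), default=len(RESPONSES)-1)
def suggest_next_question_py_alt (question : String) : String :=
  let q := PySem.Str.lower question
  let best :=
    (PySem.List.min? ((pvPriority.filter (fun kp => PySem.Str.isIn kp.1 q)).map Prod.snd) (fun x => x)).getD
      (pvResponses.length - 1)
  -- RESPONSES[best]: best is always a valid index (0 ≤ best ≤ 5)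
  (PySem.List.pyGet? pvResponses (Int.ofNat best)).getD ""

-- ===== PRECONDITION & SPEC =====
def Spec_suggest_next_question_py (question : String) (out : String) : Prop := out = suggest_next_question_py_alt question
instance (question : String) (out : String) : Decidable (Spec_suggest_next_question_py question out) := by unfold Spec_suggest_next_question_py; infer_instance

-- ===== CLAIM =====
def Claim_equal_suggest_next_question_py : Prop := ∀ (question : String), Dom_suggest_next_question_py question → Spec_suggest_next_question_py question (suggest_next_question_py question)

-- ===== LEMMAS AND PROOFS =====
-- helper (proof-only): the scored minimum over a keyword/priority table
def pvBest (q : String) (l : List (String × Nat)) : Nat :=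
  (PySem.List.min? ((l.filter (fun kp => PySem.Str.isIn kp.1 q)).map Prod.snd) (fun x => x)).getD 5

theorem pv_foldl_min_comm (xs : List Nat) : ∀ (a b : Nat),
    xs.foldl min (min a b) = min a (xs.foldl min b) := by
  induction xs with
  | nil => intro a b; rfl
  | cons x t ih =>
    intro a b
    show t.foldl min (min (min a b) x) = min a (t.foldl min (min b x))
    rw [min_assoc, ih]

theorem pvBest_nil (q : String) : pvBest q [] = 5 := rfl

theorem pvBest_le (q : String) (l : List (String × Nat)) (h : ∀ x ∈ l, x.2 ≤ 5) :
    pvBest q l ≤ 5 := by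
  unfold pvBest
  cases hm : PySem.List.min? ((l.filter (fun kp => PySem.Str.isIn kp.1 q)).map Prod.snd)
      (fun x => x) with
  | none => exact Nat.le_refl 5
  | some m =>
    have hmem := PySem.List.min?_mem hm
    rcases List.mem_map.mp hmem with ⟨x, hx, hxe⟩
    exact hxe ▸ h x (List.mem_of_mem_filter hx)

theorem pvBest_cons (q kw : String) (p : Nat) (rest : List (String × Nat)) (hp : p ≤ 5)
    (hrest : ∀ x ∈ rest, x.2 ≤ 5) :
    pvBest q ((kw, p) :: rest)
      = min (if PySem.Str.isIn kw q then p else 5) (pvBest q rest) := by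
  unfold pvBest
  rw [List.filter_cons]
  by_cases h : PySem.Str.isIn kw q = true
  · rw [if_pos h, if_pos h, List.map_cons]
    cases hm : (rest.filter (fun kp => PySem.Str.isIn kp.1 q)).map Prod.snd with
    | nil =>
      rw [PySem.List.min?_id_cons]
      exact (min_eq_left hp).symm
    | cons x xs =>
      rw [PySem.List.min?_id_cons, PySem.List.min?_id_cons]
      exact pv_foldl_min_comm xs p x
  · rw [if_neg h, if_neg h]
    have hle : ((PySem.List.min?
        ((rest.filter (fun kp => PySem.Str.isIn kp.1 q)).map Prod.snd) (fun x => x)).getD 5) ≤ 5 :=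
      pvBest_le q rest hrest
    exact (min_eq_right hle).symm

-- the whole claim, abstracted over the ten Booleans "keyword in q": a finite check
theorem pv_table (b1 b2 b3 b4 b5 b6 b7 b8 b9 b10 : Bool) :
    (if b1 || (b2 || (b3 || false)) then
      "Would you like the same trend segmented by top categories?"
    else if b4 || b5 then
      "Do you want a month-wise trend for these top geographies?"
    else if b6 then
      "Should I add cancellation rate and volume beside the category metric?"
    else if b7 then
      "Do you want a cumulative cashflow trend with running balance?"
    else if b8 || b9 || b10 then
      "Should I calculate spread percent and outlier products for this pricing view?"
    else
      "Do you want this analysis compared against another relevant dataset?")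
    =
    (PySem.List.pyGet? pvResponses (Int.ofNat
      (min (if b1 then 0 else 5) (min (if b2 then 0 else 5) (min (if b3 then 0 else 5)
        (min (if b4 then 1 else 5) (min (if b5 then 1 else 5) (min (if b6 then 2 else 5)
          (min (if b7 then 3 else 5) (min (if b8 then 4 else 5) (min (if b9 then 4 else 5)
            (min (if b10 then 4 else 5) 5)))))))))))).getD "" := by
  cases b1 <;> cases b2 <;> cases b3 <;> cases b4 <;> cases b5 <;> cases b6 <;>
    cases b7 <;> cases b8 <;> cases b9 <;> cases b10 <;> rfl

-- ===== VERDICT =====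
theorem suggest_next_question_py_spec : Claim_equal_suggest_next_question_py := by
  intro question _
  show suggest_next_question_py question = suggest_next_question_py_alt question
  unfold suggest_next_question_py suggest_next_question_py_alt
  show _ = (PySem.List.pyGet? pvResponses
      (Int.ofNat (pvBest (PySem.Str.lower question)
        [("trend", 0), ("month", 0), ("date", 0), ("state", 1), ("city", 1), ("category", 2),
         ("expense", 3), ("mrp", 4), ("tp", 4), ("price", 4)]))).getD ""
  simp only [List.any_cons, List.any_nil]
  rw [pvBest_cons _ _ _ _ (by decide) (by decide), pvBest_cons _ _ _ _ (by decide) (by decide),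
      pvBest_cons _ _ _ _ (by decide) (by decide), pvBest_cons _ _ _ _ (by decide) (by decide),
      pvBest_cons _ _ _ _ (by decide) (by decide), pvBest_cons _ _ _ _ (by decide) (by decide),
      pvBest_cons _ _ _ _ (by decide) (by decide), pvBest_cons _ _ _ _ (by decide) (by decide),
      pvBest_cons _ _ _ _ (by decide) (by decide), pvBest_cons _ _ _ _ (by decide) (by decide),
      pvBest_nil]
  exact pv_table _ _ _ _ _ _ _ _ _ _
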